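-- pv_equiv track=rewrite | github.com/epoyraz/leetcode | solutions/2241.py | recoverArray
-- ===== SOURCE A (Python) =====
-- from collections import Counter
--
-- def recoverArray(nums):
--     nums.sort()
--     n = len(nums) // 2
--
--     for i in range(1, len(nums)):
--         diff = nums[i] - nums[0]
--         if diff == 0 or diff % 2 != 0:
--             continue
--         k = diff // 2
--         count = Counter(nums)
--         res = []
--         valid = True
--         for x in nums:
--             if count[x] == 0:
--                 continue
--             if count[x + 2 * k] == 0:
--                 valid = False
--                 break
--             res.append(x + k)
--             count[x] -= 1
--             count[x + 2 * k] -= 1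
--         if valid and len(res) == n:
--             return res
-- ===== SOURCE B (Python) =====
-- def recoverArray(nums):
--     nums.sort()
--     for i in range(1, len(nums)):
--         diff = nums[i] - nums[0]
--         if diff == 0 or diff % 2 != 0:
--             continue
--         res = _pair(list(nums), diff // 2)
--         if res is not None:
--             return res
--
--
-- def _pair(remaining, k):
--     res = []
--     while remaining:
--         x = remaining.pop(0)
--         try:
--             remaining.remove(x + 2 * k)
--         except ValueError:
--             return None
--         res.append(x + k)
--     return res
-- ===== Notes on version B (the rewrite author's own statement) =====
-- stated objective: alternative
-- what changed: Per candidate k, A rebuilds a Counter and scans all of nums skipping zero-count entries; B instead greedily consumes a copy of the sorted list, popping the minimum and removing its partner x+2k directly, so no counter or skip-scan exists.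
import Mathlib
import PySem

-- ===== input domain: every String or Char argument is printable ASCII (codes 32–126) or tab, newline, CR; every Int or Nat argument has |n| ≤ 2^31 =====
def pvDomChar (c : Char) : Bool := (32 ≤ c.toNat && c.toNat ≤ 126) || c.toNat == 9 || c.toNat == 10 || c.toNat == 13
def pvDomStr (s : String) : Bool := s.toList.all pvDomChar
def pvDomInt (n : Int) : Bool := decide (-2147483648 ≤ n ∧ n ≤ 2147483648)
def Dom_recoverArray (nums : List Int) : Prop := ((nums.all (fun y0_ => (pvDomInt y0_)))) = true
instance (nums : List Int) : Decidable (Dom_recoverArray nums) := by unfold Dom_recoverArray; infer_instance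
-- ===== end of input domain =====

-- B replaces A's per-candidate Counter rebuild-and-scan with destructive greedy pairing on a
-- copy of the sorted list (pop the minimum, remove its partner); same return value, and both
-- Pythons sort `nums` in place (the equivalence proved here is about the return value).

-- ===== PORT A =====
-- inner 'for x in nums' loop of A: state (count, res); returns (count, res, valid), break = early return with valid=False
def pvScanA (k : Int) : List Int → PySem.Dict Int Int → List Int → (PySem.Dict Int Int × List Int × Bool)
  | [], c, res => (c, res, true)
  | x :: xs, c, res =>
    if c.getD x 0 = 0 then pvScanA k xs c res
    else if c.getD (x + 2 * k) 0 = 0 then (c, res, false)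
    else pvScanA k xs ((c.modify x 0 (· - 1)).modify (x + 2 * k) 0 (· - 1)) (res ++ [x + k])

-- outer 'for i in range(1, len(nums))' loop of A; early return on success, falls through to None
def pvLoopA (s : List Int) (n : Int) : List Int → Option (List Int)
  | [] => none
  | i :: is =>
    let diff := PySem.List.pyGetD s i 0 - PySem.List.pyGetD s 0 0
    if diff = 0 ∨ PySem.Int.mod diff 2 ≠ 0 then pvLoopA s n is
    else
      let out := pvScanA (PySem.Int.floordiv diff 2) s (PySem.Dict.counter s) []
      if out.2.2 = true ∧ (out.2.1.length : Int) = n then some out.2.1 else pvLoopA s n is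

def recoverArray (nums : List Int) : Option (List Int) :=
  let s := PySem.List.sorted nums (fun x => x) false
  let n := PySem.Int.floordiv (s.length : Int) 2
  pvLoopA s n (PySem.List.pyRange 1 (s.length : Int) 1)

-- ===== PORT B =====
-- length of the list returned by PySem.List.remove? (for termination of pvPairB)
theorem pv_remove?_length {v : Int} : ∀ {xs ys : List Int}, PySem.List.remove? xs v = some ys → ys.length + 1 = xs.length := by
  intro xs
  induction xs with
  | nil => intro ys h; simp [PySem.List.remove?] at h
  | cons x t ih =>
    intro ys h
    by_cases hx : x = v
    · subst hx; simp [PySem.List.remove?_cons_self] at h; subst h; rfl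
    · rw [PySem.List.remove?_cons_of_ne t hx] at h
      cases ht : PySem.List.remove? t v with
      | none => rw [ht] at h; simp at h
      | some t' => rw [ht] at h; simp at h; subst h; simp [← ih ht]

-- B's helper _pair: while remaining: pop min, remove its partner, append midpoint
def pvPairB (k : Int) : List Int → List Int → Option (List Int)
  | [], res => some res
  | x :: rest, res =>
    match h : PySem.List.remove? rest (x + 2 * k) with
    | none => none
    | some rest' => pvPairB k rest' (res ++ [x + k])
  termination_by r _ => r.length
  decreasing_by simp [← pv_remove?_length h]

-- B's outer candidate loop
def pvLoopB (s : List Int) : List Int → Option (List Int)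
  | [] => none
  | i :: is =>
    let diff := PySem.List.pyGetD s i 0 - PySem.List.pyGetD s 0 0
    if diff = 0 ∨ PySem.Int.mod diff 2 ≠ 0 then pvLoopB s is
    else
      match pvPairB (PySem.Int.floordiv diff 2) s [] with
      | some res => some res
      | none => pvLoopB s is

def recoverArray_alt (nums : List Int) : Option (List Int) :=
  let s := PySem.List.sorted nums (fun x => x) false
  pvLoopB s (PySem.List.pyRange 1 (s.length : Int) 1)

-- ===== PRECONDITION & SPEC =====
def Spec_recoverArray (nums : List Int) (out : Option (List Int)) : Prop := out = recoverArray_alt nums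
instance (nums : List Int) (out : Option (List Int)) : Decidable (Spec_recoverArray nums out) := by unfold Spec_recoverArray; infer_instance

-- ===== CLAIM (what is proved, stated in full; the proofs are below) =====
def Claim_equal_recoverArray : Prop := ∀ (nums : List Int), Dom_recoverArray nums → Spec_recoverArray nums (recoverArray nums)

-- ===== LEMMAS AND PROOFS =====

-- pvPairB consumes two elements per output element
theorem pvPairB_length (k : Int) (r res : List Int) : ∀ (p : List Int), pvPairB k r res = some p → 2 * p.length = 2 * res.length + r.length := by
  fun_induction pvPairB k r res with
  | case1 res =>
    intro p hp
    simp only [Option.some.injEq] at hp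
    subst hp; simp
  | case2 res x rest hrem =>
    intro p hp; simp at hp
  | case3 res x rest rest' hrem ih =>
    intro p hp
    have hlen := pv_remove?_length hrem
    have := ih p hp
    simp at this ⊢
    omega

-- core: A's Counter scan over the sorted list s agrees with B's destructive pairing on the
-- remaining sublist r, provided the counter counts exactly r
theorem pvScan_pair (k : Int) (hk : k ≠ 0) :
    ∀ (s : List Int), s.Pairwise (· ≤ ·) → ∀ (r : List Int) (c : PySem.Dict Int Int) (res : List Int),
      r.Sublist s → (∀ v : Int, c.getD v 0 = (r.count v : Int)) →
      (∀ p, pvPairB k r res = some p → (pvScanA k s c res).2 = (p, true)) ∧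
      (pvPairB k r res = none → (pvScanA k s c res).2.2 = false) := by
  intro s
  induction s with
  | nil =>
    intro _ r c res hsub hc
    have hr : r = [] := List.sublist_nil.mp hsub
    subst hr
    constructor
    · intro p hp
      simp only [pvPairB, Option.some.injEq] at hp
      subst hp; simp [pvScanA]
    · intro hp; simp [pvPairB] at hp
  | cons x s' ih =>
    intro hpw r c res hsub hc
    have hxle : ∀ y ∈ s', x ≤ y := (List.pairwise_cons.mp hpw).1
    have hpw' : s'.Pairwise (· ≤ ·) := (List.pairwise_cons.mp hpw).2
    by_cases hx : x ∈ r
    · -- r = x :: t with t <+ s'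
      obtain ⟨t, rfl, ht⟩ : ∃ t, r = x :: t ∧ t.Sublist s' := by
        rcases List.sublist_cons_iff.mp hsub with h | ⟨t, rfl, ht⟩
        · cases r with
          | nil => cases hx
          | cons y t =>
            have hxy : x ≤ y := hxle y (h.subset (List.mem_cons_self ..))
            have hpr : (y :: t).Pairwise (· ≤ ·) := List.Pairwise.sublist h hpw'
            have hyx : y ≤ x := by
              rcases List.mem_cons.mp hx with h1 | h1
              · exact le_of_eq h1.symm
              · exact (List.pairwise_cons.mp hpr).1 x h1
            have : y = x := le_antisymm hyx hxy
            subst this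
            exact ⟨t, rfl, List.sublist_of_cons_sublist h⟩
        · exact ⟨t, rfl, ht⟩
      have hcx : c.getD x 0 ≠ 0 := by
        rw [hc x]
        have : (x :: t).count x = t.count x + 1 := List.count_cons_self ..
        rw [this]; push_cast; omega
      have hwx : x + 2 * k ≠ x := by omega
      have hcw : c.getD (x + 2 * k) 0 = (t.count (x + 2 * k) : Int) := by
        rw [hc]; congr 1
        simp [Ne.symm hwx]
      by_cases hwt : (x + 2 * k) ∈ t
      · have hrem : PySem.List.remove? t (x + 2 * k) = some (t.erase (x + 2 * k)) :=
          PySem.List.remove?_eq_some_erase t _ hwt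
        have hcnt : 0 < t.count (x + 2 * k) := List.count_pos_iff.mpr hwt
        have hcw' : c.getD (x + 2 * k) 0 ≠ 0 := by rw [hcw]; exact_mod_cast hcnt.ne'
        have hc' : ∀ v, ((c.modify x 0 (· - 1)).modify (x + 2 * k) 0 (· - 1)).getD v 0
            = ((t.erase (x + 2 * k)).count v : Int) := by
          intro v
          simp only [PySem.Dict.getD_modify]
          by_cases h1 : v = x + 2 * k
          · subst h1
            rw [if_pos rfl, if_neg hwx, hcw, List.count_erase_self]
            have h3 := hcnt
            omega
          · rw [if_neg h1]
            by_cases h2 : v = x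
            · rw [if_pos h2, h2, List.count_erase_of_ne (Ne.symm hwx), hc x,
                List.count_cons_self]
              push_cast; omega
            · rw [if_neg h2, List.count_erase_of_ne h1, hc v]
              congr 1
              simp [Ne.symm h2]
        have hsub' : (t.erase (x + 2 * k)).Sublist s' := (List.erase_sublist).trans ht
        have IH := ih hpw' (t.erase (x + 2 * k))
          ((c.modify x 0 (· - 1)).modify (x + 2 * k) 0 (· - 1)) (res ++ [x + k]) hsub' hc'
        constructor
        · intro p hpp
          rw [pvPairB, hrem] at hpp
          simp only [pvScanA, if_neg hcx, if_neg hcw']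
          exact IH.1 p hpp
        · intro hpp
          rw [pvPairB, hrem] at hpp
          simp only [pvScanA, if_neg hcx, if_neg hcw']
          exact IH.2 hpp
      · have hrem : PySem.List.remove? t (x + 2 * k) = none :=
          (PySem.List.remove?_eq_none_iff t _).mpr hwt
        have hcw0 : c.getD (x + 2 * k) 0 = 0 := by
          rw [hcw]; norm_cast; exact List.count_eq_zero.mpr hwt
        constructor
        · intro p hpp
          rw [pvPairB, hrem] at hpp
          simp at hpp
        · intro _
          simp [pvScanA, hcx, hcw0]
    · -- x not in r: A skips, nothing changes
      have hc0 : c.getD x 0 = 0 := by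
        rw [hc x]; norm_cast; exact List.count_eq_zero.mpr hx
      have hsub' : r.Sublist s' := by
        rcases List.sublist_cons_iff.mp hsub with h | ⟨t, rfl, _⟩
        · exact h
        · exact absurd (List.mem_cons_self ..) hx
      have IH := ih hpw' r c res hsub' hc
      constructor
      · intro p hpp
        simp only [pvScanA, if_pos hc0]
        exact IH.1 p hpp
      · intro hpp
        simp only [pvScanA, if_pos hc0]
        exact IH.2 hpp

theorem pvLoop_eq (s : List Int) (hs : s.Pairwise (· ≤ ·)) :
    ∀ is, pvLoopA s (PySem.Int.floordiv (s.length : Int) 2) is = pvLoopB s is := by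
  intro is
  induction is with
  | nil => rfl
  | cons i is ih =>
    rw [pvLoopA, pvLoopB]
    by_cases hg : PySem.List.pyGetD s i 0 - PySem.List.pyGetD s 0 0 = 0 ∨
        PySem.Int.mod (PySem.List.pyGetD s i 0 - PySem.List.pyGetD s 0 0) 2 ≠ 0
    · simp only [if_pos hg]; exact ih
    · simp only [if_neg hg]
      have h0 : PySem.List.pyGetD s i 0 - PySem.List.pyGetD s 0 0 ≠ 0 := fun h => hg (Or.inl h)
      have hm : PySem.Int.mod (PySem.List.pyGetD s i 0 - PySem.List.pyGetD s 0 0) 2 = 0 :=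
        not_not.mp (fun h => hg (Or.inr h))
      have hk : PySem.Int.floordiv (PySem.List.pyGetD s i 0 - PySem.List.pyGetD s 0 0) 2 ≠ 0 := by
        have hfm := PySem.Int.floordiv_mul_add_mod (PySem.List.pyGetD s i 0 - PySem.List.pyGetD s 0 0) 2
        rw [hm] at hfm
        intro h; rw [h] at hfm; omega
      have key := pvScan_pair _ hk s hs s (PySem.Dict.counter s) [] (List.Sublist.refl s)
        (fun v => PySem.Dict.getD_counter s v)
      cases hpb : pvPairB (PySem.Int.floordiv (PySem.List.pyGetD s i 0 - PySem.List.pyGetD s 0 0) 2) s [] with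
      | some p =>
        have h1 := key.1 p hpb
        have h2 := pvPairB_length _ s [] p hpb
        simp only [List.length_nil] at h2
        have hlen : (p.length : Int) = PySem.Int.floordiv (s.length : Int) 2 := by
          rw [PySem.Int.floordiv_eq_ediv_of_pos (by norm_num)]
          omega
        simp only [h1, hlen]
        simp
      | none =>
        have h2 := key.2 hpb
        simp only [h2, Bool.false_eq_true, false_and, if_false]
        exact ih

-- ===== VERDICT (by name: the statement is the Claim_ definition above) =====
theorem recoverArray_spec : Claim_equal_recoverArray := by
  intro nums _
  unfold Spec_recoverArray recoverArray recoverArray_alt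
  exact pvLoop_eq _ (PySem.List.sorted_pairwise nums (fun x => x)) _
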